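-- pv_equiv track=rewrite | github.com/Angeloff9292/LearnPython | Python/HW/whos_first.py | whos_first
-- ===== SOURCE A (Python) =====
-- def whos_first(p1, p2):
--     pl1 = []
--     pl2 = []
--     for i in p1:
--         if i.isalpha() == False:
--             pl1.append(i)
--         else:
--             break
--     for i in p2:
--         if i.isalpha() == False:
--             pl2.append(i)
--         else:
--             break
--     if len(pl1) > len(pl2):
--         return "p2"
--     elif len(pl2) > len(pl1):
--         return "p1"
--     else:
--         return "tie"
-- ===== SOURCE B (Python) =====
-- def whos_first(p1, p2):
--     # single simultaneous scan instead of building two prefix lists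
--     i = 0
--     n1, n2 = len(p1), len(p2)
--     while i < n1 and i < n2 and not p1[i].isalpha() and not p2[i].isalpha():
--         i += 1
--     c1 = i < n1 and not p1[i].isalpha()  # p1's non-alpha prefix continues past i
--     c2 = i < n2 and not p2[i].isalpha()
--     if c1 and not c2:
--         return "p2"
--     if c2 and not c1:
--         return "p1"
--     return "tie"
-- ===== Notes on version B (the rewrite author's own statement) =====
-- stated objective: alternative
-- what changed: Replaces the two prefix-list builds and length comparison by one simultaneous index scan of both strings that stops as soon as either reaches its first alphabetic character (or its end), then decides from which side can still continue; no lists are allocated.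
import Mathlib
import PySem

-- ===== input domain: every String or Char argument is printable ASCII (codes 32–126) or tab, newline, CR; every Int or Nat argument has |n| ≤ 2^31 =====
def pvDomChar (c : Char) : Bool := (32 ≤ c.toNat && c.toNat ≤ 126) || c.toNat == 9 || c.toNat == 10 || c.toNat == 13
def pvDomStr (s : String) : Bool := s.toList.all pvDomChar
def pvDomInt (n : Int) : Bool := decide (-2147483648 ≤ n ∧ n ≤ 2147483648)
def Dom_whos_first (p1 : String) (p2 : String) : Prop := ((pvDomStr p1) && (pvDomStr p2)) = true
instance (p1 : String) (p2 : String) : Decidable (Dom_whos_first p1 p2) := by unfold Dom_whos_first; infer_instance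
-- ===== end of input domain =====

-- B replaces the two prefix-list builds by one simultaneous scan of both strings; alternative decomposition, no lists allocated.

-- ===== PORT A =====
-- the 'for i in p: if not i.isalpha(): append else break' loop: collected prefix
def pvPrefA : List Char → List Char
  | [] => []
  | c :: cs => if PySem.Chars.isalpha c = false then c :: pvPrefA cs else []

def whos_first (p1 : String) (p2 : String) : String :=
  let pl1 := pvPrefA p1.toList
  let pl2 := pvPrefA p2.toList
  if pl1.length > pl2.length then "p2"
  else if pl2.length > pl1.length then "p1"
  else "tie"

-- ===== PORT B =====
-- whether the non-alpha prefix continues at the current position (c1/c2 in Source B)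
def pvCont : List Char → Bool
  | [] => false
  | c :: _ => !PySem.Chars.isalpha c

-- the verdict after the scan stopped
def pvFinish (l1 l2 : List Char) : String :=
  let c1 := pvCont l1
  let c2 := pvCont l2
  if c1 && !c2 then "p2"
  else if c2 && !c1 then "p1"
  else "tie"

-- the while loop: advance both strings while both heads exist and are non-alphabetic
def pvScan : List Char → List Char → String
  | c1 :: cs1, c2 :: cs2 =>
    if !PySem.Chars.isalpha c1 && !PySem.Chars.isalpha c2 then pvScan cs1 cs2
    else pvFinish (c1 :: cs1) (c2 :: cs2)
  | l1, l2 => pvFinish l1 l2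

def whos_first_alt (p1 : String) (p2 : String) : String :=
  pvScan p1.toList p2.toList

-- ===== PRECONDITION & SPEC =====
def Spec_whos_first (p1 : String) (p2 : String) (out : String) : Prop := out = whos_first_alt p1 p2
instance (p1 : String) (p2 : String) (out : String) : Decidable (Spec_whos_first p1 p2 out) := by unfold Spec_whos_first; infer_instance

-- ===== CLAIM (what is proved, stated in full; the proofs are below) =====
def Claim_equal_whos_first : Prop := ∀ (p1 : String) (p2 : String), Dom_whos_first p1 p2 → Spec_whos_first p1 p2 (whos_first p1 p2)

-- ===== LEMMAS AND PROOFS =====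

theorem pvCont_iff_len (l : List Char) : pvCont l = true ↔ 0 < (pvPrefA l).length := by
  cases l with
  | nil => simp [pvCont, pvPrefA]
  | cons c cs =>
    by_cases h : PySem.Chars.isalpha c = false <;> simp [pvCont, pvPrefA, h]

theorem pvScan_eq (l1 : List Char) : ∀ l2 : List Char,
    pvScan l1 l2 =
      (if (pvPrefA l1).length > (pvPrefA l2).length then "p2"
       else if (pvPrefA l2).length > (pvPrefA l1).length then "p1"
       else "tie") := by
  induction l1 with
  | nil =>
    intro l2
    have h := pvCont_iff_len l2
    cases l2 with
    | nil => simp [pvScan, pvFinish, pvCont, pvPrefA]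
    | cons c cs =>
      simp only [pvScan, pvFinish, pvCont, pvPrefA]
      by_cases hc : PySem.Chars.isalpha c = false <;> simp [hc]
  | cons c1 cs1 ih =>
    intro l2
    cases l2 with
    | nil =>
      simp only [pvScan, pvFinish, pvCont]
      by_cases hc : PySem.Chars.isalpha c1 = false <;>
        simp [hc, pvPrefA]
    | cons c2 cs2 =>
      by_cases h1 : PySem.Chars.isalpha c1 = false <;>
      by_cases h2 : PySem.Chars.isalpha c2 = false
      · simp [pvScan, h1, h2, ih cs2, pvPrefA]
      · have h2' : PySem.Chars.isalpha c2 = true := by simp_all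
        simp [pvScan, h1, h2', pvFinish, pvCont, pvPrefA]
      · have h1' : PySem.Chars.isalpha c1 = true := by simp_all
        simp [pvScan, h1', pvFinish, pvCont, pvPrefA, h2]
      · have h1' : PySem.Chars.isalpha c1 = true := by simp_all
        have h2' : PySem.Chars.isalpha c2 = true := by simp_all
        simp [pvScan, h1', h2', pvFinish, pvCont, pvPrefA]

-- ===== VERDICT (by name: the statement is the Claim_ definition above) =====
theorem whos_first_spec : Claim_equal_whos_first := by
  intro p1 p2 _
  unfold Spec_whos_first whos_first whos_first_alt
  rw [pvScan_eq]
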